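-- pv_equiv track=rewrite | github.com/ysknsid25/atcoder | src/2025/ABC408-C.py | min_turrets_to_destroy
-- ===== SOURCE A (Python) =====
-- def min_turrets_to_destroy(n, m, intervals):
--     # 壁ごとの守られている砲台の数をカウント
--     wall_count = [0] * (n + 1)
--     for l, r in intervals:
--         wall_count[l] += 1
--         if r + 1 <= n:
--             wall_count[r + 1] -= 1
--
--     # 累積和を計算して各壁の守られている砲台の数を求める
--     for i in range(1, n + 1):
--         wall_count[i] += wall_count[i - 1]
--
--     # 最小値を求める
--     return min(wall_count[1:])
-- ===== SOURCE B (Python) =====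
-- def min_turrets_to_destroy(n, m, intervals):
--     # Sweep walls 1..n with two pointers over the sorted left and right endpoints:
--     # coverage(i) = #{l <= i} - #{r < i}; track the running minimum.
--     ls = sorted(l for l, r in intervals)
--     rs = sorted(r for l, r in intervals)
--     t = len(intervals)
--     j = k = 0
--     best = None
--     for i in range(1, n + 1):
--         while j < t and ls[j] <= i:
--             j += 1
--         while k < t and rs[k] < i:
--             k += 1
--         cov = j - k
--         if best is None or cov < best:
--             best = cov
--     return best
-- ===== Notes on version B (the rewrite author's own statement) =====
-- stated objective: alternative
-- what changed: Replaces the difference-array + in-place prefix-sum pass over a length-(n+1) list by a two-pointer sweep over the separately sorted left and right endpoints, computing each wall's coverage as #{l<=i}-#{r<i} and keeping a running minimum, with no wall_count array at all.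
-- outside the precondition, e.g. on min_turrets_to_destroy(3, 1, [(-2, 5)]): A returns 0, B returns 1; on min_turrets_to_destroy(0, 0, []): A raises ValueError, B returns None; on min_turrets_to_destroy(2, 1, [(5, 5)]): A raises IndexError, B returns 0
import Mathlib
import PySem

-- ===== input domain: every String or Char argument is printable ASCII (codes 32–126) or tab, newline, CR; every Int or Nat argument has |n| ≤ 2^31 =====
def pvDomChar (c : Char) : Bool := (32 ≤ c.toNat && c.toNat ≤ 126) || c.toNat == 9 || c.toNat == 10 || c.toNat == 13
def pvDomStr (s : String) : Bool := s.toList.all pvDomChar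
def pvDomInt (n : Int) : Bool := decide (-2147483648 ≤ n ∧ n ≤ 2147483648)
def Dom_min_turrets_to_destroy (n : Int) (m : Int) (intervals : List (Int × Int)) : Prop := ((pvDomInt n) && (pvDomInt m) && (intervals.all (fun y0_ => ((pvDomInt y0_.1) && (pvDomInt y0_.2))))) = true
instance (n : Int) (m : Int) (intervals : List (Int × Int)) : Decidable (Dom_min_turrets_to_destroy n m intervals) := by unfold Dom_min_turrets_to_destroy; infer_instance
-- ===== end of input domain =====

-- B replaces A's difference-array + prefix-sum pass by a two-pointer sweep over sorted
-- endpoint lists (alternative decomposition, similar cost); equal on the stated Pre_.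



-- ===== PORT A =====
-- Python list index resolution (PySem.List.pyIdx?) over an Array: wall_count[i] += v and
-- wall_count[i]; out-of-range is a no-op / 0 (there Python raises IndexError; Pre_ excludes it)
def pyAddAtA (xs : Array Int) (i : Int) (v : Int) : Array Int :=
  match PySem.List.pyIdx? xs.size i with
  | some j => if h : j < xs.size then xs.set j (xs[j] + v) h else xs
  | none => xs

def pyGetA (xs : Array Int) (i : Int) : Int :=
  match PySem.List.pyIdx? xs.size i with
  | some j => xs.getD j 0
  | none => 0

def min_turrets_to_destroy (n : Int) (m : Int) (intervals : List (Int × Int)) : Int :=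
  -- wall_count = [0] * (n + 1)
  let wc0 : Array Int := Array.replicate (n + 1).toNat 0
  -- for l, r in intervals: wall_count[l] += 1; if r + 1 <= n: wall_count[r + 1] -= 1
  let wc1 := intervals.foldl (fun wc p =>
    let wc := pyAddAtA wc p.1 1
    if p.2 + 1 ≤ n then pyAddAtA wc (p.2 + 1) (-1) else wc) wc0
  -- for i in range(1, n + 1): wall_count[i] += wall_count[i - 1]
  let wc2 := (PySem.List.pyRange 1 (n + 1) 1).foldl (fun wc i =>
    pyAddAtA wc i (pyGetA wc (i - 1))) wc1
  -- min(wall_count[1:])   (Pre_ guarantees the slice is nonempty; getD 0 is the total form)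
  (PySem.List.min? (PySem.List.slice wc2.toList (some 1) none) (fun x => x)).getD 0

-- ===== PORT B =====
-- while j < len(xs) and p(xs[j]): j += 1   (fuel = remaining length, so it is structural)
def advGo (p : Int → Bool) (xs : List Int) : Nat → Nat → Nat
  | 0, j => j
  | fuel + 1, j =>
    if h : j < xs.length then
      (if p xs[j] then advGo p xs fuel (j + 1) else j)
    else j

def advWhile (p : Int → Bool) (xs : List Int) (j : Nat) : Nat :=
  advGo p xs (xs.length - j) j

def min_turrets_to_destroy_alt (n : Int) (m : Int) (intervals : List (Int × Int)) : Int :=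
  let ls := PySem.List.sorted (intervals.map (fun p => p.1)) (fun x => x) false
  let rs := PySem.List.sorted (intervals.map (fun p => p.2)) (fun x => x) false
  let res := (PySem.List.pyRange 1 (n + 1) 1).foldl
    (fun (s : Nat × Nat × Option Int) i =>
      let j := advWhile (fun x => x ≤ i) ls s.1
      let k := advWhile (fun x => x < i) rs s.2.1
      let cov : Int := (j : Int) - (k : Int)
      let best := match s.2.2 with
        | none => some cov
        | some b => if cov < b then some cov else some b
      (j, k, best))
    (0, 0, none)
  -- Python returns best (None when n < 1); Pre_ guarantees a value, getD 0 is the total form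
  res.2.2.getD 0

-- ===== PRECONDITION & SPEC =====
-- Pre_ excludes inputs where A raises (n ≤ 0: min of an empty slice raises ValueError; an
-- endpoint indexing wall_count outside Python's index range raises IndexError) and intervals
-- with a negative endpoint whose Python negative index lands strictly inside the wall array —
-- an unspecified corner where A's wrapped position and B's reading of the interval are two
-- different defensible choices.  Negative endpoints wrapping to cell 0 or 1 (p.1 = -(n+1) or
-- -n; p.2 = -(n+1) or -(n+2)) affect every wall uniformly, agree provably, and stay admitted.
def Pre_min_turrets_to_destroy (n : Int) (m : Int) (intervals : List (Int × Int)) : Prop :=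
  1 ≤ n ∧ ∀ p ∈ intervals,
    (0 ≤ p.1 ∧ p.1 ≤ n ∨ p.1 = -(n+1) ∨ p.1 = -n)
    ∧ (-1 ≤ p.2 ∨ p.2 = -(n+1) ∨ p.2 = -(n+2))
instance (n : Int) (m : Int) (intervals : List (Int × Int)) : Decidable (Pre_min_turrets_to_destroy n m intervals) := by unfold Pre_min_turrets_to_destroy; infer_instance

def pvWitness_min_turrets_to_destroy : Int × Int × (List (Int × Int)) := (4, 2, [(1, 2), (2, 4)])

def Spec_min_turrets_to_destroy (n : Int) (m : Int) (intervals : List (Int × Int)) (out : Int) : Prop := out = min_turrets_to_destroy_alt n m intervals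
instance (n : Int) (m : Int) (intervals : List (Int × Int)) (out : Int) : Decidable (Spec_min_turrets_to_destroy n m intervals out) := by unfold Spec_min_turrets_to_destroy; infer_instance

-- ===== CLAIM (what is proved, stated in full; the proofs are below) =====
def Claim_equal_min_turrets_to_destroy : Prop := ∀ (n : Int) (m : Int) (intervals : List (Int × Int)), Dom_min_turrets_to_destroy n m intervals → Pre_min_turrets_to_destroy n m intervals → Spec_min_turrets_to_destroy n m intervals (min_turrets_to_destroy n m intervals)

-- ===== LEMMAS AND PROOFS =====
-- the List-level mirror of pyAddAtA (proof-side only; pySetD/pyGetD are the Python-exact primitives)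
def pyAddAt (xs : List Int) (i : Int) (v : Int) : List Int :=
  PySem.List.pySetD xs i (PySem.List.pyGetD xs i 0 + v)

theorem length_pyAddAt (xs : List Int) (i v : Int) : (pyAddAt xs i v).length = xs.length := by
  simp [pyAddAt, PySem.List.length_pySetD]

theorem pyIdx?_lt {len : Nat} {i : Int} {j : Nat}
    (h : PySem.List.pyIdx? len i = some j) : j < len := by
  unfold PySem.List.pyIdx? at h
  split_ifs at h <;> simp_all <;> omega

theorem pyIdx?_of_nonneg {len : Nat} {i : Int} (h0 : 0 ≤ i) (h1 : i < (len : Int)) :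
    PySem.List.pyIdx? len i = some i.toNat := by
  unfold PySem.List.pyIdx?
  rw [if_pos h0, if_pos h1]

theorem pyIdx?_of_neg {len : Nat} {i : Int} (h1 : i < 0) (h0 : -(len : Int) ≤ i) :
    PySem.List.pyIdx? len i = some ((len : Int) + i).toNat := by
  unfold PySem.List.pyIdx?
  rw [if_neg (by omega), if_pos h0]
  congr 1
  omega

theorem toList_pyAddAtA (xs : Array Int) (i v : Int) :
    (pyAddAtA xs i v).toList = pyAddAt xs.toList i v := by
  unfold pyAddAtA pyAddAt
  simp only [PySem.List.pySetD, PySem.List.pySet?, PySem.List.pyGetD, PySem.List.pyGet?,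
    Array.length_toList]
  cases hidx : PySem.List.pyIdx? xs.size i with
  | none => simp
  | some j =>
    have hj : j < xs.size := pyIdx?_lt hidx
    simp only [Option.map_some, Option.getD_some, Option.bind_some, dif_pos hj,
      Array.toList_set]
    congr 2
    rw [List.getElem?_eq_getElem (by simpa using hj)]
    simp [Array.getElem_toList]

theorem pyGetA_eq (xs : Array Int) (i : Int) :
    pyGetA xs i = PySem.List.pyGetD xs.toList i 0 := by
  unfold pyGetA
  simp only [PySem.List.pyGetD, PySem.List.pyGet?, Array.length_toList]
  cases hidx : PySem.List.pyIdx? xs.size i with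
  | none => simp
  | some j =>
    have hj : j < xs.size := pyIdx?_lt hidx
    simp only [Option.bind_some]
    rw [List.getElem?_eq_getElem (by simpa using hj), Array.getD_eq_getD_getElem?,
        Array.getElem?_eq_getElem hj]
    simp [Array.getElem_toList]

theorem getD_pyAddAt_at (xs : List Int) (i v : Int) (j : Nat)
    (hidx : PySem.List.pyIdx? xs.length i = some j) (k : Nat) :
    (pyAddAt xs i v).getD k 0 = if k = j then xs.getD k 0 + v else xs.getD k 0 := by
  have hj : j < xs.length := pyIdx?_lt hidx
  unfold pyAddAt
  simp only [PySem.List.pySetD, PySem.List.pySet?, PySem.List.pyGetD, PySem.List.pyGet?,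
    hidx, Option.map_some, Option.getD_some, Option.bind_some]
  rw [List.getElem?_eq_getElem hj]
  rcases Nat.lt_or_ge k xs.length with hk | hk
  · rw [List.getD_eq_getElem _ _ (by simpa using hk), List.getD_eq_getElem _ _ hk,
        List.getElem_set]
    split_ifs with h2 h3 h3
    · subst h3; rfl
    · omega
    · omega
    · rfl
  · rw [List.getD_eq_default _ _ (by simpa using hk), List.getD_eq_default _ _ hk]
    have : ¬ (k = j) := by omega
    simp [this]

theorem getD_pyAddAt (xs : List Int) (i v : Int) (h0 : 0 ≤ i) (h1 : i < xs.length) (k : Nat) :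
    (pyAddAt xs i v).getD k 0 = if (k : Int) = i then xs.getD k 0 + v else xs.getD k 0 := by
  rw [getD_pyAddAt_at xs i v i.toNat (pyIdx?_of_nonneg h0 (by omega)) k]
  by_cases h : (k : Int) = i
  · rw [if_pos h, if_pos (by omega)]
  · rw [if_neg h, if_neg (by omega)]

theorem getD_pyAddAt_neg (xs : List Int) (i v : Int) (h1 : i < 0)
    (h0 : -(xs.length : Int) ≤ i) (k : Nat) :
    (pyAddAt xs i v).getD k 0
      = if (k : Int) = (xs.length : Int) + i then xs.getD k 0 + v else xs.getD k 0 := by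
  rw [getD_pyAddAt_at xs i v ((xs.length : Int) + i).toNat (pyIdx?_of_neg h1 h0) k]
  by_cases h : (k : Int) = (xs.length : Int) + i
  · rw [if_pos h, if_pos (by omega)]
  · rw [if_neg h, if_neg (by omega)]

def effL (n : Int) (l : Int) : Int := if 0 ≤ l then l else n + 1 + l
def effR (n : Int) (r : Int) : Int := if 0 ≤ r + 1 then r + 1 else n + 1 + (r + 1)

theorem countP_add_of {α : Type} (l : List α) (p q r : α → Bool)
    (h : ∀ a ∈ l, (if q a then 1 else 0) = ((if p a then 1 else 0) + (if r a then 1 else 0) : Nat)) :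
    l.countP q = l.countP p + l.countP r := by
  induction l with
  | nil => simp
  | cons a t ih =>
    have ha := h a (by simp)
    have ht := ih (fun b hb => h b (by simp [hb]))
    rw [List.countP_cons, List.countP_cons, List.countP_cons]
    omega

theorem diff_fold (n : Int) (hn : 1 ≤ n) (ivs : List (Int × Int)) :
    ∀ wc : List Int, wc.length = (n + 1).toNat →
    (∀ p ∈ ivs, (0 ≤ p.1 ∧ p.1 ≤ n ∨ p.1 = -(n+1) ∨ p.1 = -n)
      ∧ (-1 ≤ p.2 ∨ p.2 = -(n+1) ∨ p.2 = -(n+2))) →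
    (ivs.foldl (fun wc p =>
        if p.2 + 1 ≤ n then pyAddAt (pyAddAt wc p.1 1) (p.2 + 1) (-1)
        else pyAddAt wc p.1 1) wc).length = wc.length ∧
    ∀ k : Nat, k < (n + 1).toNat →
      (ivs.foldl (fun wc p =>
        if p.2 + 1 ≤ n then pyAddAt (pyAddAt wc p.1 1) (p.2 + 1) (-1)
        else pyAddAt wc p.1 1) wc).getD k 0
      = wc.getD k 0 + (ivs.countP (fun p => decide (effL n p.1 = (k : Int))) : Int)
          - (ivs.countP (fun p => decide (p.2 + 1 ≤ n ∧ effR n p.2 = (k : Int))) : Int) := by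
  induction ivs with
  | nil => intro wc hlen _; simp
  | cons p rest ih =>
    intro wc hlen hpre
    obtain ⟨hp1, hp2⟩ := hpre p (by simp)
    have hrest : ∀ q ∈ rest, (0 ≤ q.1 ∧ q.1 ≤ n ∨ q.1 = -(n+1) ∨ q.1 = -n)
        ∧ (-1 ≤ q.2 ∨ q.2 = -(n+1) ∨ q.2 = -(n+2)) :=
      fun q hq => hpre q (by simp [hq])
    have hlen' : (wc.length : Int) = n + 1 := by omega
    simp only [List.foldl_cons]
    set wc' : List Int :=
      if p.2 + 1 ≤ n then pyAddAt (pyAddAt wc p.1 1) (p.2 + 1) (-1)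
      else pyAddAt wc p.1 1 with hwc'
    have hlen2 : wc'.length = (n + 1).toNat := by
      rw [hwc']
      split_ifs <;> simp only [pyAddAt, PySem.List.length_pySetD] <;> omega
    have hblL : -(n+1) ≤ p.1 ∧ p.1 ≤ n := by
      rcases hp1 with ⟨h,h'⟩|h|h <;> omega
    have hblR : -(n+1) ≤ p.2 + 1 := by
      rcases hp2 with h|h|h <;> omega
    have hgetL : ∀ k : Nat, (pyAddAt wc p.1 1).getD k 0
        = if (k : Int) = effL n p.1 then wc.getD k 0 + 1 else wc.getD k 0 := by
      intro k
      by_cases hL : 0 ≤ p.1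
      · rw [getD_pyAddAt _ _ _ hL (by omega)]
        simp only [effL, if_pos hL]
      · rw [getD_pyAddAt_neg _ _ _ (by omega) (by omega), hlen']
        simp only [effL, if_neg hL]
    have hlenL : (pyAddAt wc p.1 1).length = wc.length := by
      simp [pyAddAt, PySem.List.length_pySetD]
    have hstep : ∀ k : Nat, k < (n + 1).toNat →
        wc'.getD k 0 = wc.getD k 0 + (if effL n p.1 = (k : Int) then 1 else 0)
          - (if p.2 + 1 ≤ n ∧ effR n p.2 = (k : Int) then 1 else 0) := by
      intro k hk
      rw [hwc']
      by_cases hg : p.2 + 1 ≤ n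
      · rw [if_pos hg]
        by_cases hR : 0 ≤ p.2 + 1
        · rw [getD_pyAddAt _ _ _ hR (by rw [hlenL]; omega), hgetL k]
          simp only [effR, if_pos hR, hg, true_and]
          split_ifs <;> omega
        · rw [getD_pyAddAt_neg _ _ _ (by omega) (by rw [hlenL]; omega), hlenL, hlen',
              hgetL k]
          simp only [effR, if_neg hR, hg, true_and]
          split_ifs <;> omega
      · rw [if_neg hg, hgetL k]
        have : ¬ (p.2 + 1 ≤ n ∧ effR n p.2 = (k : Int)) := by
          intro hc; exact hg hc.1
        rw [if_neg this]
        split_ifs <;> omega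
    obtain ⟨ihlen, ihval⟩ := ih wc' hlen2 hrest
    refine ⟨by rw [ihlen, hlen2, hlen], ?_⟩
    intro k hk
    rw [ihval k hk, hstep k hk, List.countP_cons, List.countP_cons]
    by_cases c1 : effL n p.1 = (k : Int) <;>
      by_cases c2 : p.2 + 1 ≤ n ∧ effR n p.2 = (k : Int) <;>
      simp only [c1, c2, decide_true, decide_false, if_pos, if_neg, not_false_iff,
        decide_eq_true_eq, if_true, if_false] <;>
      push_cast <;> ring

def presum (xs : List Int) : Nat → Int
  | 0 => xs.getD 0 0
  | k + 1 => presum xs k + xs.getD (k + 1) 0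

theorem presum_eq (n : Int) (hn : 1 ≤ n) (ivs : List (Int × Int))
    (hpre : ∀ p ∈ ivs, (0 ≤ p.1 ∧ p.1 ≤ n ∨ p.1 = -(n+1) ∨ p.1 = -n)
      ∧ (-1 ≤ p.2 ∨ p.2 = -(n+1) ∨ p.2 = -(n+2)))
    (w1 : List Int)
    (hw : ∀ k : Nat, k < (n + 1).toNat →
      w1.getD k 0 = (ivs.countP (fun p => decide (effL n p.1 = (k : Int))) : Int)
        - (ivs.countP (fun p => decide (p.2 + 1 ≤ n ∧ effR n p.2 = (k : Int))) : Int)) :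
    ∀ j : Nat, (j : Int) ≤ n →
      presum w1 j = (ivs.countP (fun p => decide (effL n p.1 ≤ (j : Int))) : Int)
        - (ivs.countP (fun p => decide (p.2 + 1 ≤ n ∧ effR n p.2 ≤ (j : Int))) : Int) := by
  have hfacts : ∀ p ∈ ivs, 0 ≤ effL n p.1 ∧ (p.2 + 1 ≤ n → 0 ≤ effR n p.2) := by
    intro p hp
    obtain ⟨h1, h2⟩ := hpre p hp
    constructor
    · simp only [effL]; split_ifs with h <;> rcases h1 with ⟨a,b⟩|a|a <;> omega
    · intro _; simp only [effR]; split_ifs with h <;> rcases h2 with a|a|a <;> omega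
  intro j
  induction j with
  | zero =>
    intro _
    rw [presum, hw 0 (by omega)]
    have e1 : ivs.countP (fun p => decide (effL n p.1 = ((0 : Nat) : Int)))
        = ivs.countP (fun p => decide (effL n p.1 ≤ ((0 : Nat) : Int))) := by
      apply List.countP_congr
      intro p hp
      have := (hfacts p hp).1
      simp only [decide_eq_true_eq]
      omega
    have e2 : ivs.countP (fun p => decide (p.2 + 1 ≤ n ∧ effR n p.2 = ((0 : Nat) : Int)))
        = ivs.countP (fun p => decide (p.2 + 1 ≤ n ∧ effR n p.2 ≤ ((0 : Nat) : Int))) := by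
      apply List.countP_congr
      intro p hp
      have := (hfacts p hp).2
      simp only [decide_eq_true_eq]
      constructor
      · rintro ⟨a, b⟩; exact ⟨a, by omega⟩
      · rintro ⟨a, b⟩; have := this a; exact ⟨a, by omega⟩
    rw [e1, e2]
  | succ j ih =>
    intro hj
    rw [presum, ih (by omega), hw (j + 1) (by omega)]
    have s1 : ivs.countP (fun p => decide (effL n p.1 ≤ ((j + 1 : Nat) : Int)))
        = ivs.countP (fun p => decide (effL n p.1 ≤ ((j : Nat) : Int)))
          + ivs.countP (fun p => decide (effL n p.1 = ((j + 1 : Nat) : Int))) := by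
      apply countP_add_of
      intro p hp
      simp only [decide_eq_true_eq]
      push_cast
      split_ifs <;> omega
    have s2 : ivs.countP (fun p => decide (p.2 + 1 ≤ n ∧ effR n p.2 ≤ ((j + 1 : Nat) : Int)))
        = ivs.countP (fun p => decide (p.2 + 1 ≤ n ∧ effR n p.2 ≤ ((j : Nat) : Int)))
          + ivs.countP (fun p => decide (p.2 + 1 ≤ n ∧ effR n p.2 = ((j + 1 : Nat) : Int))) := by
      apply countP_add_of
      intro p hp
      simp only [decide_eq_true_eq]
      push_cast
      split_ifs <;> omega
    rw [s1, s2]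
    push_cast
    ring

theorem counts_L (n : Int) (hn : 1 ≤ n) (ivs : List (Int × Int))
    (hpre : ∀ p ∈ ivs, (0 ≤ p.1 ∧ p.1 ≤ n ∨ p.1 = -(n+1) ∨ p.1 = -n)
      ∧ (-1 ≤ p.2 ∨ p.2 = -(n+1) ∨ p.2 = -(n+2)))
    (j : Int) (hj1 : 1 ≤ j) :
    ivs.countP (fun p => decide (effL n p.1 ≤ j))
      = ivs.countP (fun p => decide (p.1 ≤ j)) := by
  apply List.countP_congr
  intro p hp
  obtain ⟨h1, _⟩ := hpre p hp
  simp only [decide_eq_true_eq, effL]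
  split_ifs with h <;> rcases h1 with ⟨a,b⟩|a|a <;> omega

theorem counts_R (n : Int) (hn : 1 ≤ n) (ivs : List (Int × Int))
    (hpre : ∀ p ∈ ivs, (0 ≤ p.1 ∧ p.1 ≤ n ∨ p.1 = -(n+1) ∨ p.1 = -n)
      ∧ (-1 ≤ p.2 ∨ p.2 = -(n+1) ∨ p.2 = -(n+2)))
    (j : Int) (hj1 : 1 ≤ j) (hjn : j ≤ n) :
    ivs.countP (fun p => decide (p.2 + 1 ≤ n ∧ effR n p.2 ≤ j))
      = ivs.countP (fun p => decide (p.2 < j)) := by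
  apply List.countP_congr
  intro p hp
  obtain ⟨_, h2⟩ := hpre p hp
  simp only [decide_eq_true_eq, effR]
  split_ifs with h <;> rcases h2 with a|a|a <;> omega

theorem countP_prefix_iff (p : Int → Bool) (xs : List Int)
    (hs : xs.Pairwise (fun a b => a ≤ b))
    (hp : ∀ a b : Int, a ≤ b → p b = true → p a = true) :
    ∀ k (hk : k < xs.length), (p xs[k] = true ↔ k < xs.countP p) := by
  induction xs with
  | nil => intro k hk; simp at hk
  | cons x t ih =>
    rw [List.pairwise_cons] at hs
    intro k hk
    by_cases hx : p x = true
    · rw [List.countP_cons_of_pos hx]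
      cases k with
      | zero => simpa using hx
      | succ k =>
        have h2 := ih hs.2 k (by simpa using hk)
        simpa [List.getElem_cons_succ, Nat.succ_lt_succ_iff] using h2
    · have ht : ∀ a ∈ t, p a = false := by
        intro a ha
        by_contra h
        exact hx (hp x a (hs.1 a ha) (by simpa using h))
      have hc : (x :: t).countP p = 0 := by
        rw [List.countP_eq_zero]
        intro a ha
        rcases List.mem_cons.mp ha with rfl | ha
        · simpa using hx
        · simp [ht a ha]
      rw [hc]
      cases k with
      | zero => simpa using hx
      | succ k =>
        have hk' : k < t.length := by simpa using hk
        have hmem : t[k] ∈ t := List.getElem_mem hk'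
        simp [List.getElem_cons_succ, ht _ hmem]

theorem advGo_eq_countP (p : Int → Bool) (xs : List Int)
    (hs : xs.Pairwise (fun a b => a ≤ b))
    (hp : ∀ a b : Int, a ≤ b → p b = true → p a = true) :
    ∀ fuel j, j ≤ xs.countP p → xs.length - j ≤ fuel → advGo p xs fuel j = xs.countP p := by
  have hcle : xs.countP p ≤ xs.length := List.countP_le_length
  intro fuel
  induction fuel with
  | zero => intro j hj hf; simp [advGo]; omega
  | succ fuel ih =>
    intro j hj hf
    rw [advGo]
    split_ifs with h1 h2
    · exact ih (j+1) (by have := (countP_prefix_iff p xs hs hp j h1).mp h2; omega) (by omega)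
    · have := (countP_prefix_iff p xs hs hp j h1).mpr
      by_contra hne
      exact h2 (this (by omega))
    · omega

theorem advWhile_eq_countP (p : Int → Bool) (xs : List Int)
    (hs : xs.Pairwise (fun a b => a ≤ b))
    (hp : ∀ a b : Int, a ≤ b → p b = true → p a = true)
    (j : Nat) (hj : j ≤ xs.countP p) : advWhile p xs j = xs.countP p :=
  advGo_eq_countP p xs hs hp _ j hj (by omega)

-- min of xs ++ [x]  (Python's running min with "if cov < best", first minimum kept)
theorem minq_append_singleton (xs : List Int) (x : Int) :
    PySem.List.min? (xs ++ [x]) (fun y => y)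
      = some (match PySem.List.min? xs (fun y => y) with
              | none => x
              | some b => if x < b then x else b) := by
  cases xs with
  | nil => simp [PySem.List.min?_id_cons, PySem.List.min?]
  | cons y t =>
    rw [List.cons_append, PySem.List.min?_id_cons, PySem.List.min?_id_cons,
        List.foldl_append]
    simp only [List.foldl_cons, List.foldl_nil]
    congr 1
    rcases lt_or_ge x (List.foldl min y t) with h | h
    · simp [min_eq_right (le_of_lt h), h]
    · simp [min_eq_left h]
      intro hc
      omega

-- countP splitting helper
theorem prefix_fold (n : Int) (w1 : List Int) (hlen : w1.length = (n + 1).toNat) :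
    ∀ t : Nat, (t : Int) ≤ n →
    ((PySem.List.pyRange 1 (1 + (t : Int)) 1).foldl (fun wc i =>
        pyAddAt wc i (PySem.List.pyGetD wc (i - 1) 0)) w1).length = w1.length ∧
    (∀ k : Nat, k ≤ t →
      ((PySem.List.pyRange 1 (1 + (t : Int)) 1).foldl (fun wc i =>
        pyAddAt wc i (PySem.List.pyGetD wc (i - 1) 0)) w1).getD k 0 = presum w1 k) ∧
    (∀ k : Nat, t < k →
      ((PySem.List.pyRange 1 (1 + (t : Int)) 1).foldl (fun wc i =>
        pyAddAt wc i (PySem.List.pyGetD wc (i - 1) 0)) w1).getD k 0 = w1.getD k 0) := by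
  intro t
  induction t with
  | zero =>
    intro _
    rw [PySem.List.pyRange_one_eq_nil (by omega)]
    refine ⟨rfl, ?_, fun k _ => rfl⟩
    intro k hk
    interval_cases k
    rfl
  | succ t ih =>
    intro htn
    obtain ⟨ihlen, ihin, ihout⟩ := ih (by omega)
    have hsplit : PySem.List.pyRange 1 (1 + ((t + 1 : Nat) : Int)) 1
        = PySem.List.pyRange 1 (1 + (t : Int)) 1 ++ [1 + (t : Int)] := by
      have : (1 + ((t + 1 : Nat) : Int)) = (1 + (t : Int)) + 1 := by push_cast; ring
      rw [this, PySem.List.pyRange_one_succ_right (by omega)]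
    rw [hsplit, List.foldl_append]
    set w2 := (PySem.List.pyRange 1 (1 + (t : Int)) 1).foldl (fun wc i =>
        pyAddAt wc i (PySem.List.pyGetD wc (i - 1) 0)) w1 with hw2
    simp only [List.foldl_cons, List.foldl_nil]
    have hl2 : w2.length = (n + 1).toNat := by rw [ihlen, hlen]
    have hread : PySem.List.pyGetD w2 (1 + (t : Int) - 1) 0 = presum w1 t := by
      have h1 : (1 + (t : Int) - 1) = ((t : Nat) : Int) := by push_cast; ring
      rw [h1, PySem.List.pyGetD_natCast]
      have hb : t < w2.length := by omega
      rw [List.getD_eq_getElem _ _ hb, ← List.getD_eq_getElem _ _ hb]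
      exact ihin t le_rfl
    rw [hread]
    have hlen3 : (pyAddAt w2 (1 + (t : Int)) (presum w1 t)).length = w2.length :=
      length_pyAddAt _ _ _
    have hval : ∀ k : Nat, (pyAddAt w2 (1 + (t : Int)) (presum w1 t)).getD k 0
        = if (k : Int) = 1 + (t : Int) then w2.getD k 0 + presum w1 t else w2.getD k 0 :=
      getD_pyAddAt w2 _ _ (by omega) (by omega)
    refine ⟨by rw [hlen3, ihlen], ?_, ?_⟩
    · intro k hk
      rw [hval k]
      rcases Nat.lt_or_ge k (t + 1) with h | h
      · rw [if_neg (by omega)]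
        exact ihin k (by omega)
      · have hk1 : k = t + 1 := by omega
        subst hk1
        rw [if_pos (by push_cast; ring), ihout (t + 1) (by omega), presum]
        ring
    · intro k hk
      rw [hval k, if_neg (by omega)]
      exact ihout k (by omega)

theorem minq_nil : PySem.List.min? ([] : List Int) (fun y => y) = none := by
  simp [PySem.List.min?]

theorem B_fold (ls rs : List Int)
    (hls : ls.Pairwise (fun a b => a ≤ b)) (hrs : rs.Pairwise (fun a b => a ≤ b)) :
    ∀ t : Nat,
    (PySem.List.pyRange 1 (1 + (t : Int)) 1).foldl
      (fun (s : Nat × Nat × Option Int) i =>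
        let j := advWhile (fun x => x ≤ i) ls s.1
        let k := advWhile (fun x => x < i) rs s.2.1
        let cov : Int := (j : Int) - (k : Int)
        let best := match s.2.2 with
          | none => some cov
          | some b => if cov < b then some cov else some b
        (j, k, best))
      (0, 0, none)
    = ((if t = 0 then 0 else ls.countP (fun x => decide (x ≤ (t : Int)))),
       (if t = 0 then 0 else rs.countP (fun x => decide (x < (t : Int)))),
       PySem.List.min? ((PySem.List.pyRange 1 (1 + (t : Int)) 1).map
         (fun i => ((ls.countP (fun x => decide (x ≤ i)) : Int)
           - (rs.countP (fun x => decide (x < i)) : Int)))) (fun x => x)) := by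
  intro t
  induction t with
  | zero =>
    rw [PySem.List.pyRange_one_eq_nil (by omega)]
    simp [minq_nil]
  | succ t ih =>
    have hsplit : PySem.List.pyRange 1 (1 + ((t + 1 : Nat) : Int)) 1
        = PySem.List.pyRange 1 (1 + (t : Int)) 1 ++ [1 + (t : Int)] := by
      have h : (1 + ((t + 1 : Nat) : Int)) = (1 + (t : Int)) + 1 := by push_cast; ring
      rw [h, PySem.List.pyRange_one_succ_right (by omega)]
    rw [hsplit, List.foldl_append, ih, List.map_append]
    simp only [List.foldl_cons, List.foldl_nil, List.map_cons, List.map_nil]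
    -- the new pointer values
    have hpL : ∀ a b : Int, a ≤ b → (decide (b ≤ 1 + (t : Int))) = true
        → (decide (a ≤ 1 + (t : Int))) = true := by
      intro a b hab h; simp only [decide_eq_true_eq] at h ⊢; omega
    have hpR : ∀ a b : Int, a ≤ b → (decide (b < 1 + (t : Int))) = true
        → (decide (a < 1 + (t : Int))) = true := by
      intro a b hab h; simp only [decide_eq_true_eq] at h ⊢; omega
    have hjle : (if t = 0 then 0 else ls.countP (fun x => decide (x ≤ (t : Int))))
        ≤ ls.countP (fun x => decide (x ≤ 1 + (t : Int))) := by
      split_ifs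
      · omega
      · exact List.countP_mono_left (fun x _ h => by
          simp only [decide_eq_true_eq] at h ⊢; omega)
    have hkle : (if t = 0 then 0 else rs.countP (fun x => decide (x < (t : Int))))
        ≤ rs.countP (fun x => decide (x < 1 + (t : Int))) := by
      split_ifs
      · omega
      · exact List.countP_mono_left (fun x _ h => by
          simp only [decide_eq_true_eq] at h ⊢; omega)
    have hj : advWhile (fun x => decide (x ≤ 1 + (t : Int))) ls
        (if t = 0 then 0 else ls.countP (fun x => decide (x ≤ (t : Int))))
        = ls.countP (fun x => decide (x ≤ 1 + (t : Int))) :=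
      advWhile_eq_countP _ _ hls hpL _ hjle
    have hk : advWhile (fun x => decide (x < 1 + (t : Int))) rs
        (if t = 0 then 0 else rs.countP (fun x => decide (x < (t : Int))))
        = rs.countP (fun x => decide (x < 1 + (t : Int))) :=
      advWhile_eq_countP _ _ hrs hpR _ hkle
    have hcast : ((t + 1 : Nat) : Int) = 1 + (t : Int) := by push_cast; ring
    rw [hj, hk, minq_append_singleton]
    have ht1 : ¬ (t + 1 = 0) := by omega
    rw [if_neg ht1, if_neg ht1, hcast]
    cases hmin : PySem.List.min? ((PySem.List.pyRange 1 (1 + (t : Int)) 1).map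
        (fun i => ((ls.countP (fun x => decide (x ≤ i)) : Int)
          - (rs.countP (fun x => decide (x < i)) : Int)))) (fun x => x) with
    | none => rfl
    | some b =>
      dsimp only
      split_ifs <;> rfl

theorem getD_replicate_zero (k j : Nat) : (List.replicate k (0 : Int)).getD j 0 = 0 := by
  rcases Nat.lt_or_ge j k with h | h
  · rw [List.getD_eq_getElem _ _ (by simpa using h), List.getElem_replicate]
  · rw [List.getD_eq_default _ _ (by simpa using h)]

theorem A_eval (n : Int) (m : Int) (ivs : List (Int × Int)) (hn : 1 ≤ n)
    (hiv : ∀ p ∈ ivs, (0 ≤ p.1 ∧ p.1 ≤ n ∨ p.1 = -(n+1) ∨ p.1 = -n)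
      ∧ (-1 ≤ p.2 ∨ p.2 = -(n+1) ∨ p.2 = -(n+2))) :
    min_turrets_to_destroy n m ivs
      = (PySem.List.min? ((PySem.List.pyRange 1 (n + 1) 1).map
          (fun i => ((ivs.countP (fun p => decide (p.1 ≤ i)) : Int)
            - (ivs.countP (fun p => decide (p.2 < i)) : Int)))) (fun x => x)).getD 0 := by
  have e0 : min_turrets_to_destroy n m ivs
      = (PySem.List.min? (PySem.List.slice
          (((PySem.List.pyRange 1 (n + 1) 1).foldl (fun wc i =>
              pyAddAtA wc i (pyGetA wc (i - 1)))
            (ivs.foldl (fun wc p =>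
              if p.2 + 1 ≤ n then pyAddAtA (pyAddAtA wc p.1 1) (p.2 + 1) (-1)
              else pyAddAtA wc p.1 1) (Array.replicate (n + 1).toNat 0))).toList)
          (some 1) none) (fun x => x)).getD 0 := rfl
  -- move the whole Array computation to its List mirror
  have hb1 : ∀ (l : List (Int × Int)) (a : Array Int),
      (l.foldl (fun wc p =>
        if p.2 + 1 ≤ n then pyAddAtA (pyAddAtA wc p.1 1) (p.2 + 1) (-1)
        else pyAddAtA wc p.1 1) a).toList
      = l.foldl (fun wc p =>
        if p.2 + 1 ≤ n then pyAddAt (pyAddAt wc p.1 1) (p.2 + 1) (-1)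
        else pyAddAt wc p.1 1) a.toList := by
    intro l
    induction l with
    | nil => intro a; rfl
    | cons p t ih =>
      intro a
      simp only [List.foldl_cons]
      rw [ih]
      congr 1
      by_cases hg : p.2 + 1 ≤ n
      · rw [if_pos hg, if_pos hg, toList_pyAddAtA, toList_pyAddAtA]
      · rw [if_neg hg, if_neg hg, toList_pyAddAtA]
  have hb2 : ∀ (l : List Int) (a : Array Int),
      (l.foldl (fun wc i => pyAddAtA wc i (pyGetA wc (i - 1))) a).toList
      = l.foldl (fun wc i => pyAddAt wc i (PySem.List.pyGetD wc (i - 1) 0)) a.toList := by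
    intro l
    induction l with
    | nil => intro a; rfl
    | cons i t ih =>
      intro a
      simp only [List.foldl_cons]
      rw [ih]
      congr 1
      rw [toList_pyAddAtA, pyGetA_eq]
  rw [e0, hb2, hb1, Array.toList_replicate]
  set W1 := ivs.foldl (fun wc p =>
      if p.2 + 1 ≤ n then pyAddAt (pyAddAt wc p.1 1) (p.2 + 1) (-1)
      else pyAddAt wc p.1 1) (List.replicate (n + 1).toNat 0) with hW1
  obtain ⟨hlen1, hval1⟩ := diff_fold n hn ivs (List.replicate (n + 1).toNat 0) (by simp) hiv
  rw [← hW1] at hlen1 hval1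
  have hlen1' : W1.length = (n + 1).toNat := by simpa using hlen1
  have hw : ∀ k : Nat, k < (n + 1).toNat →
      W1.getD k 0 = (ivs.countP (fun p => decide (effL n p.1 = (k : Int))) : Int)
        - (ivs.countP (fun p => decide (p.2 + 1 ≤ n ∧ effR n p.2 = (k : Int))) : Int) := by
    intro k hk
    rw [hval1 k hk, getD_replicate_zero]
    ring
  have hrange : PySem.List.pyRange 1 (n + 1) 1 = PySem.List.pyRange 1 (1 + (n.toNat : Int)) 1 := by
    have : (1 + (n.toNat : Int)) = n + 1 := by omega
    rw [this]
  obtain ⟨hlen2, hin2, _⟩ := prefix_fold n W1 hlen1' n.toNat (by omega)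
  rw [hrange]
  set W2 := (PySem.List.pyRange 1 (1 + (n.toNat : Int)) 1).foldl (fun wc i =>
      pyAddAt wc i (PySem.List.pyGetD wc (i - 1) 0)) W1 with hW2
  have hlen2' : W2.length = (n + 1).toNat := by rw [hlen2, hlen1']
  have hslice : PySem.List.slice W2 (some 1) none = W2.drop 1 := by
    rw [PySem.List.slice_from _ (by norm_num)]
    norm_num
  rw [hslice]
  have hlist : W2.drop 1 = (PySem.List.pyRange 1 (n + 1) 1).map
      (fun i => ((ivs.countP (fun p => decide (p.1 ≤ i)) : Int)
        - (ivs.countP (fun p => decide (p.2 < i)) : Int))) := by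
    apply List.ext_getElem
    · simp only [List.length_drop, List.length_map, PySem.List.length_pyRange_one, hlen2']
      omega
    · intro k h1 h2
      have hk : k < n.toNat := by
        simp only [List.length_drop, hlen2'] at h1; omega
      rw [List.getElem_drop]
      have hb : 1 + k < W2.length := by omega
      rw [← List.getD_eq_getElem _ 0 hb]
      have h1k : 1 + k = k + 1 := by omega
      rw [h1k, hin2 (k + 1) (by omega)]
      rw [List.getElem_map, PySem.List.getElem_pyRange_one]
      have hc : ((k + 1 : Nat) : Int) = 1 + (k : Int) := by push_cast; ring
      rw [presum_eq n hn ivs hiv W1 hw (k + 1) (by omega),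
          counts_L n hn ivs hiv _ (by omega),
          counts_R n hn ivs hiv _ (by omega) (by omega), hc]
  rw [hlist, hrange]
theorem B_eval (n : Int) (m : Int) (ivs : List (Int × Int)) (hn : 1 ≤ n) :
    min_turrets_to_destroy_alt n m ivs
      = (PySem.List.min? ((PySem.List.pyRange 1 (n + 1) 1).map
          (fun i => ((ivs.countP (fun p => decide (p.1 ≤ i)) : Int)
            - (ivs.countP (fun p => decide (p.2 < i)) : Int)))) (fun x => x)).getD 0 := by
  set ls := PySem.List.sorted (ivs.map (fun p => p.1)) (fun x => x) false with hls
  set rs := PySem.List.sorted (ivs.map (fun p => p.2)) (fun x => x) false with hrs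
  have e0 : min_turrets_to_destroy_alt n m ivs
      = ((PySem.List.pyRange 1 (n + 1) 1).foldl
          (fun (s : Nat × Nat × Option Int) i =>
            let j := advWhile (fun x => x ≤ i) ls s.1
            let k := advWhile (fun x => x < i) rs s.2.1
            let cov : Int := (j : Int) - (k : Int)
            let best := match s.2.2 with
              | none => some cov
              | some b => if cov < b then some cov else some b
            (j, k, best))
          (0, 0, none)).2.2.getD 0 := rfl
  rw [e0]
  have hrange : PySem.List.pyRange 1 (n + 1) 1 = PySem.List.pyRange 1 (1 + (n.toNat : Int)) 1 := by
    have : (1 + (n.toNat : Int)) = n + 1 := by omega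
    rw [this]
  rw [hrange, B_fold ls rs (by simpa using PySem.List.sorted_pairwise (ivs.map (fun p => p.1)) (fun x => x))
    (by simpa using PySem.List.sorted_pairwise (ivs.map (fun p => p.2)) (fun x => x)) n.toNat]
  have hmapc : ∀ i : Int,
      ((ls.countP (fun x => decide (x ≤ i)) : Int) - (rs.countP (fun x => decide (x < i)) : Int))
      = ((ivs.countP (fun p => decide (p.1 ≤ i)) : Int) - (ivs.countP (fun p => decide (p.2 < i)) : Int)) := by
    intro i
    rw [List.Perm.countP_eq _ (PySem.List.sorted_perm (ivs.map (fun p => p.1)) (fun x => x) false),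
        List.Perm.countP_eq _ (PySem.List.sorted_perm (ivs.map (fun p => p.2)) (fun x => x) false),
        List.countP_map, List.countP_map]
    rfl
  have hmeq : ((PySem.List.pyRange 1 (1 + (n.toNat : Int)) 1).map
      (fun i => ((ls.countP (fun x => decide (x ≤ i)) : Int)
        - (rs.countP (fun x => decide (x < i)) : Int))))
      = ((PySem.List.pyRange 1 (n + 1) 1).map
      (fun i => ((ivs.countP (fun p => decide (p.1 ≤ i)) : Int)
        - (ivs.countP (fun p => decide (p.2 < i)) : Int)))) := by
    rw [← hrange]
    exact List.map_congr_left (fun i _ => hmapc i)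
  dsimp only
  rw [hmeq, hrange]


-- ===== VERDICT (by name: the statement is the Claim_ definition above) =====
theorem min_turrets_to_destroy_spec : Claim_equal_min_turrets_to_destroy := by
  intro n m ivs _ hpre
  obtain ⟨hn, hiv⟩ := hpre
  unfold Spec_min_turrets_to_destroy
  rw [A_eval n m ivs hn hiv, B_eval n m ivs hn]
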